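-- pv_equiv track=rewrite | github.com/Adam-Jimenez/binarysearch-editorials | Cheapest Bus Route.py | solve
-- ===== SOURCE A (Python) =====
-- from heapq import heapify, heappop, heappush
-- from collections import defaultdict
--
-- def solve(connections):
--     start = 0
--     target = max(max(y,x) for y,x,_ in connections)
--
--     adj = defaultdict(list)
--     for f,t,id in connections:
--         adj[f].append((t,id))
--
--     hp = [(0, start, -1)] # (cost, cur_pos cur_bus)
--     seen = defaultdict(set)
--
--     while hp:
--         cost, cur_pos, cur_bus = heappop(hp)
--         if cur_pos == target:
--             return cost
--         if cur_bus in seen[cur_pos]: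
--             continue
--         seen[cur_pos].add(cur_bus)
--
--         for nex_pos, nex_bus in adj[cur_pos]:
--             next_cost = cost
--             if nex_bus != cur_bus:
--                 next_cost += 1
--             heappush(hp, (next_cost, nex_pos, nex_bus))
--
--     return -1
-- ===== SOURCE B (Python) =====
-- def solve(connections):
--     target = max(max(f, t) for f, t, _ in connections)
--     frontier = [(0, 0, -1)]  # kept sorted ascending; head = cheapest state
--     seen = set()             # finalized (position, bus) states
--     while frontier:
--         cost, pos, bus = frontier.pop(0)
--         if pos == target:
--             return cost
--         if (pos, bus) in seen:
--             continue
--         seen.add((pos, bus))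
--         for f, t, b in connections:
--             if f == pos:
--                 item = (cost + (1 if b != bus else 0), t, b)
--                 i = 0
--                 while i < len(frontier) and frontier[i] <= item:
--                     i += 1
--                 frontier.insert(i, item)
--     return -1
-- ===== Notes on version B (the rewrite author's own statement) =====
-- stated objective: alternative
-- what changed: Replaces A's heapq binary heap, defaultdict adjacency index and per-position sets of seen buses with an insertion-sorted frontier list popped from the front, a direct scan of the connection list at each expansion, and a single set of (pos, bus) states.
import Mathlib
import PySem

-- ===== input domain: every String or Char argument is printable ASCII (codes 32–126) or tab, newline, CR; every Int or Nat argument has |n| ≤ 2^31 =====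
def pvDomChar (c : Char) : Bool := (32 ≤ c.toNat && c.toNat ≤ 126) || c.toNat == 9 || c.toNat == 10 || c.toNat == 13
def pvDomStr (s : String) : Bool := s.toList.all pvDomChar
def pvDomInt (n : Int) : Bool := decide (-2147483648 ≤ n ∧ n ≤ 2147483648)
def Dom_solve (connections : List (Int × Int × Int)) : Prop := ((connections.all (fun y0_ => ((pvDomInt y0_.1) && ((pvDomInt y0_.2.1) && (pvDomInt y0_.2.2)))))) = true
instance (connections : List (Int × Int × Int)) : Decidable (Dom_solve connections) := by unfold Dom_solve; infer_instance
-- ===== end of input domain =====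

-- B replaces A's heapq binary heap, defaultdict adjacency index and per-position bus sets with an
-- insertion-sorted frontier list popped from the front, direct scans of the connection list and one
-- set of (pos, bus) states — an alternative of similar cost, not claimed faster.

-- Python tuple comparison on int triples (lexicographic) — used by both Pythons: the heap in A
-- orders its (cost, pos, bus) tuples by it, B's `frontier[i] <= item` compares the same tuples.
def tupLe (a b : Int × Int × Int) : Bool :=
  decide (a.1 < b.1 ∨ (a.1 = b.1 ∧ (a.2.1 < b.2.1 ∨ (a.2.1 = b.2.1 ∧ a.2.2 ≤ b.2.2))))

-- `max(max(y, x) for y, x, _ in connections)`: both Pythons compute the target with this same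
-- expression (on [] Python raises ValueError — excluded by Pre_solve; the [] arm is a dummy).
def maxNode : List (Int × Int × Int) → Int
  | [] => 0
  | c :: rest => rest.foldl (fun m c => max m (max c.1 c.2.1)) (max c.1 c.2.1)

-- fuel for the while-loops (a port artifact, identical in both ports): the loop pops at most
-- 1 + (pushes) elements and at most length+1 distinct states are ever expanded, each pushing at
-- most length entries, so (length+1)*length + 2 iterations always suffice.
def fuelOf (connections : List (Int × Int × Int)) : Nat :=
  (connections.length + 1) * connections.length + 2

-- ===== PORT A =====
-- heapq is ported by its value semantics, which are exact here: the heap holds int triples compared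
-- by value, the program observes the heap only through heappop, and heappop returns the minimum
-- element (Python tuple order) and removes one occurrence of it.
def heapPush (hp : List (Int × Int × Int)) (x : Int × Int × Int) : List (Int × Int × Int) :=
  hp ++ [x]

-- the minimum that heappop of a nonempty heap (head h, rest t) returns
def heapMin (x : Int × Int × Int) (l : List (Int × Int × Int)) : Int × Int × Int :=
  l.foldl (fun a b => if tupLe a b then a else b) x

-- adj = defaultdict(list); for f,t,id in connections: adj[f].append((t,id))
def adjOf (connections : List (Int × Int × Int)) : PySem.Dict Int (List (Int × Int)) :=
  connections.foldl (fun d c => d.modify c.1 [] (· ++ [(c.2.1, c.2.2)])) PySem.Dict.empty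

-- `while hp:` with heappop, the target test, the seen check and the push loop of A
def loopA (tgt : Int) (adj : PySem.Dict Int (List (Int × Int))) :
    Nat → List (Int × Int × Int) → PySem.Dict Int (PySem.Set Int) → Int
  | 0, _, _ => -1
  | _ + 1, [], _ => -1
  | fuel + 1, h :: t, seen =>
    let m := heapMin h t                  -- cost, cur_pos, cur_bus = heappop(hp)
    let hp' := (h :: t).erase m
    let cost := m.1
    let pos := m.2.1
    let bus := m.2.2
    if pos = tgt then cost
    else
      let s := seen.getD pos PySem.Set.empty        -- seen[cur_pos] (defaultdict(set))
      if s.contains bus then loopA tgt adj fuel hp' seen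
      else
        let seen' := seen.insert pos (s.add bus)    -- seen[cur_pos].add(cur_bus)
        let hp'' := (adj.getD pos []).foldl
          (fun hp e => heapPush hp ((if e.2 ≠ bus then cost + 1 else cost), e.1, e.2)) hp'
        loopA tgt adj fuel hp'' seen'

def solve (connections : List (Int × Int × Int)) : Int :=
  let target := maxNode connections
  let adj := adjOf connections
  loopA target adj (fuelOf connections) [(0, 0, -1)] PySem.Dict.empty

-- ===== PORT B =====
-- `i = 0; while i < len(frontier) and frontier[i] <= item: i += 1; frontier.insert(i, item)`
def insort (x : Int × Int × Int) : List (Int × Int × Int) → List (Int × Int × Int)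
  | [] => [x]
  | y :: ys => if tupLe y x then y :: insort x ys else x :: y :: ys

-- `while frontier:` with frontier.pop(0), the seen check and the scan of connections of B
def loopB (tgt : Int) (connections : List (Int × Int × Int)) :
    Nat → List (Int × Int × Int) → PySem.Set (Int × Int) → Int
  | 0, _, _ => -1
  | _ + 1, [], _ => -1
  | fuel + 1, v :: rest, seen =>
    let cost := v.1                       -- cost, pos, bus = frontier.pop(0)
    let pos := v.2.1
    let bus := v.2.2
    if pos = tgt then cost
    else if seen.contains (pos, bus) then loopB tgt connections fuel rest seen
    else
      let seen' := seen.add (pos, bus)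
      let front' := connections.foldl
        (fun fr c => if c.1 = pos then
            insort (cost + (if c.2.2 ≠ bus then 1 else 0), c.2.1, c.2.2) fr
          else fr) rest
      loopB tgt connections fuel front' seen'

def solve_alt (connections : List (Int × Int × Int)) : Int :=
  let target := maxNode connections
  loopB target connections (fuelOf connections) [(0, 0, -1)] PySem.Set.empty

-- ===== PRECONDITION & SPEC =====
-- Pre_solve excludes only the empty list, on which both Pythons raise ValueError (max of an empty sequence).
def Pre_solve (connections : List (Int × Int × Int)) : Prop := connections ≠ []
instance (connections : List (Int × Int × Int)) : Decidable (Pre_solve connections) := by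
  unfold Pre_solve; infer_instance

def pvWitness_solve : (List (Int × Int × Int)) := [(0, 1, 7)]

def Spec_solve (connections : List (Int × Int × Int)) (out : Int) : Prop := out = solve_alt connections
instance (connections : List (Int × Int × Int)) (out : Int) : Decidable (Spec_solve connections out) := by unfold Spec_solve; infer_instance

-- ===== CLAIM (what is proved, stated in full; the proofs are below) =====
def Claim_equal_solve : Prop := ∀ (connections : List (Int × Int × Int)), Dom_solve connections → Pre_solve connections → Spec_solve connections (solve connections)

-- ===== LEMMAS AND PROOFS =====

lemma tupLe_refl (a : Int × Int × Int) : tupLe a a = true := by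
  simp [tupLe]

lemma tupLe_total (a b : Int × Int × Int) : tupLe a b = true ∨ tupLe b a = true := by
  simp only [tupLe, decide_eq_true_eq]
  omega

lemma tupLe_trans {a b c : Int × Int × Int} (h1 : tupLe a b = true) (h2 : tupLe b c = true) :
    tupLe a c = true := by
  simp only [tupLe, decide_eq_true_eq] at *
  omega

lemma tupLe_antisymm {a b : Int × Int × Int} (h1 : tupLe a b = true) (h2 : tupLe b a = true) :
    a = b := by
  obtain ⟨a1, a2, a3⟩ := a
  obtain ⟨b1, b2, b3⟩ := b
  simp only [tupLe, decide_eq_true_eq] at *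
  simp only [Prod.mk.injEq]
  omega

lemma heapMin_mem : ∀ (l : List (Int × Int × Int)) (x : Int × Int × Int),
    heapMin x l ∈ x :: l := by
  intro l
  induction l with
  | nil => intro x; simp [heapMin]
  | cons b l ih =>
    intro x
    have hstep : heapMin x (b :: l) = heapMin (if tupLe x b then x else b) l := by
      simp [heapMin]
    rw [hstep]
    have h := ih (if tupLe x b then x else b)
    rcases List.mem_cons.mp h with h | h
    · rw [h]
      by_cases hb : tupLe x b = true <;> simp [hb]
    · simp [h]

lemma heapMin_le : ∀ (l : List (Int × Int × Int)) (x y : Int × Int × Int),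
    y ∈ x :: l → tupLe (heapMin x l) y = true := by
  intro l
  induction l with
  | nil =>
    intro x y hy
    simp at hy
    subst hy
    simp [heapMin, tupLe_refl]
  | cons b l ih =>
    intro x y hy
    have hstep : heapMin x (b :: l) = heapMin (if tupLe x b then x else b) l := by
      simp [heapMin, List.foldl_cons]
    have hminle : tupLe (heapMin (if tupLe x b then x else b) l) (if tupLe x b then x else b) = true :=
      ih _ _ (by simp)
    rw [hstep]
    rcases List.mem_cons.mp hy with hy | hy
    · -- y = x
      rw [hy]
      by_cases hb : tupLe x b = true
      · simpa [hb] using hminle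
      · have hbx : tupLe b x = true := (tupLe_total x b).resolve_left hb
        have : tupLe (heapMin (if tupLe x b then x else b) l) b = true := by simpa [hb] using hminle
        exact tupLe_trans this hbx
    · rcases List.mem_cons.mp hy with hy | hy
      · -- y = b
        rw [hy]
        by_cases hb : tupLe x b = true
        · exact tupLe_trans (by simpa [hb] using hminle) hb
        · simpa [hb] using hminle
      · exact ih _ _ (List.mem_cons_of_mem _ hy)

-- popping from A's heap agrees with popping the head of B's sorted frontier
lemma heap_pop_eq (h v : Int × Int × Int) (t rest : List (Int × Int × Int))
    (hperm : (h :: t).Perm (v :: rest))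
    (hsort : (v :: rest).Pairwise (fun a b => tupLe a b = true)) :
    heapMin h t = v ∧ ((h :: t).erase (heapMin h t)).Perm rest := by
  have hm_mem : heapMin h t ∈ v :: rest := hperm.mem_iff.mp (heapMin_mem t h)
  have hv_le : tupLe v (heapMin h t) = true := by
    rcases List.mem_cons.mp hm_mem with hm | hm
    · rw [hm]; exact tupLe_refl v
    · exact (List.pairwise_cons.mp hsort).1 _ hm
  have hm_le : tupLe (heapMin h t) v = true :=
    heapMin_le t h v (hperm.mem_iff.mpr (List.mem_cons_self ..))
  have heq : heapMin h t = v := tupLe_antisymm hm_le hv_le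
  refine ⟨heq, ?_⟩
  rw [heq]
  have := hperm.erase v
  simpa [List.erase_cons_head] using this

lemma insort_perm (x : Int × Int × Int) :
    ∀ l : List (Int × Int × Int), (insort x l).Perm (x :: l) := by
  intro l
  induction l with
  | nil => simp [insort]
  | cons y ys ih =>
    by_cases hb : tupLe y x = true
    · simp only [insort, hb, if_pos]
      exact (ih.cons y).trans (List.Perm.swap x y ys)
    · simp only [insort]
      rw [if_neg hb]

lemma insort_sorted (x : Int × Int × Int) :
    ∀ l : List (Int × Int × Int), l.Pairwise (fun a b => tupLe a b = true) →
      (insort x l).Pairwise (fun a b => tupLe a b = true) := by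
  intro l
  induction l with
  | nil => intro _; simp [insort]
  | cons y ys ih =>
    intro hs
    obtain ⟨hy, hys⟩ := List.pairwise_cons.mp hs
    by_cases hb : tupLe y x = true
    · simp only [insort, hb, if_pos]
      refine List.pairwise_cons.mpr ⟨?_, ih hys⟩
      intro z hz
      have : z ∈ x :: ys := (insort_perm x ys).mem_iff.mp hz
      rcases List.mem_cons.mp this with hz | hz
      · rw [hz]; exact hb
      · exact hy _ hz
    · have hxy : tupLe x y = true := (tupLe_total y x).resolve_left hb
      simp only [insort]
      rw [if_neg hb]
      refine List.pairwise_cons.mpr ⟨?_, hs⟩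
      intro z hz
      rcases List.mem_cons.mp hz with hz | hz
      · rw [hz]; exact hxy
      · exact tupLe_trans hxy (hy _ hz)

-- one expansion: A appends the mapped adjacency row to the heap, B insorts the same values while
-- scanning connections; multiset equality and sortedness are preserved.
lemma push_step (pos : Int) (g : (Int × Int × Int) → (Int × Int × Int)) :
    ∀ (cs : List (Int × Int × Int)) (hp fr : List (Int × Int × Int)),
      hp.Perm fr → fr.Pairwise (fun a b => tupLe a b = true) →
      (hp ++ ((cs.filter (fun c => c.1 == pos)).map g)).Perm
          (cs.foldl (fun fr c => if c.1 = pos then insort (g c) fr else fr) fr)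
        ∧ (cs.foldl (fun fr c => if c.1 = pos then insort (g c) fr else fr) fr).Pairwise
            (fun a b => tupLe a b = true) := by
  intro cs
  induction cs with
  | nil => intro hp fr hperm hsort; exact ⟨by simpa using hperm, hsort⟩
  | cons c cs ih =>
    intro hp fr hperm hsort
    by_cases hc : c.1 = pos
    · have hperm' : (hp ++ [g c]).Perm (insort (g c) fr) :=
        ((List.perm_append_singleton _ _).trans (hperm.cons _)).trans
          (insort_perm (g c) fr).symm
      have hsort' := insort_sorted (g c) fr hsort
      have := ih (hp ++ [g c]) (insort (g c) fr) hperm' hsort'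
      simpa [hc, List.filter_cons, List.append_assoc] using this
    · have := ih hp fr hperm hsort
      simpa [hc, List.filter_cons] using this

-- the adjacency dict built by A, read back: exactly the connections out of `pos`, in order
lemma adjOf_getD (connections : List (Int × Int × Int)) (p : Int) :
    (adjOf connections).getD p [] =
      (connections.filter (fun c => c.1 == p)).map (fun c => (c.2.1, c.2.2)) := by
  unfold adjOf
  have hfold :
      connections.foldl (fun d c => d.modify c.1 [] (· ++ [(c.2.1, c.2.2)])) PySem.Dict.empty =
        (connections.map (fun c => (c.1, (c.2.1, c.2.2)))).foldl
          (fun d q => d.modify q.1 [] (· ++ [q.2])) PySem.Dict.empty := by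
    rw [List.foldl_map]
  rw [hfold, PySem.Dict.getD_foldl_modify_append]
  simp [PySem.Dict.getD_empty]

-- the two seen structures agree after recording a new state
lemma seen_invariant_step (seenA : PySem.Dict Int (PySem.Set Int))
    (seenB : PySem.Set (Int × Int)) (pos bus : Int)
    (hseen : ∀ p b : Int, b ∈ seenA.getD p PySem.Set.empty ↔ (p, b) ∈ seenB) :
    ∀ p b : Int,
      b ∈ (seenA.insert pos ((seenA.getD pos PySem.Set.empty).add bus)).getD p PySem.Set.empty ↔
        (p, b) ∈ seenB.add (pos, bus) := by
  intro p b
  rw [PySem.Dict.getD_insert, PySem.Set.mem_add]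
  by_cases hp : p = pos
  · subst hp
    rw [if_pos rfl, PySem.Set.mem_add, hseen p b]
    constructor
    · rintro (h | h)
      · exact Or.inl h
      · exact Or.inr (by rw [h])
    · rintro (h | h)
      · exact Or.inl h
      · exact Or.inr (by injection h with h1 h2)
  · rw [if_neg hp, hseen p b]
    constructor
    · exact Or.inl
    · rintro (h | h)
      · exact h
      · exact absurd (congrArg Prod.fst h) hp

-- the main bisimulation: A's heap loop and B's sorted-frontier loop agree whenever the heap and the
-- frontier hold the same multiset (frontier sorted) and the two seen structures agree.
lemma bisim (tgt : Int) (connections : List (Int × Int × Int)) :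
    ∀ (fuel : Nat) (hp front : List (Int × Int × Int))
      (seenA : PySem.Dict Int (PySem.Set Int)) (seenB : PySem.Set (Int × Int)),
      hp.Perm front →
      front.Pairwise (fun a b => tupLe a b = true) →
      (∀ p b : Int, b ∈ seenA.getD p PySem.Set.empty ↔ (p, b) ∈ seenB) →
      loopA tgt (adjOf connections) fuel hp seenA = loopB tgt connections fuel front seenB := by
  intro fuel
  induction fuel with
  | zero => intro hp front seenA seenB _ _ _; rfl
  | succ fuel ih =>
    intro hp front seenA seenB hperm hsort hseen
    match front with
    | [] =>
      have : hp = [] := List.Perm.eq_nil hperm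
      subst this
      rfl
    | v :: rest =>
      match hp with
      | [] => exact absurd hperm.symm (by simp)
      | h :: t =>
        obtain ⟨hmin, herase⟩ := heap_pop_eq h v t rest hperm hsort
        rw [hmin] at herase
        have hrest : rest.Pairwise (fun a b => tupLe a b = true) :=
          (List.pairwise_cons.mp hsort).2
        simp only [loopA, loopB, hmin]
        -- both sides branch on the same popped state v
        by_cases htgt : v.2.1 = tgt
        · simp [htgt]
        · by_cases hm : (v.2.1, v.2.2) ∈ seenB
          · -- already seen: both continue with the popped element removed
            have h1 : (seenA.getD v.2.1 PySem.Set.empty).contains v.2.2 = true := by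
              rw [PySem.Set.contains_iff]
              exact (hseen v.2.1 v.2.2).mpr hm
            have h2 : seenB.contains (v.2.1, v.2.2) = true := by
              rw [PySem.Set.contains_iff]
              exact hm
            simp only [htgt, h1, h2, if_true]
            exact ih _ rest seenA seenB herase hrest hseen
          · -- expand: record the state and push the out-edges of v.2.1
            have h1 : (seenA.getD v.2.1 PySem.Set.empty).contains v.2.2 = false := by
              rw [← Bool.not_eq_true, PySem.Set.contains_iff]
              exact fun hx => hm ((hseen v.2.1 v.2.2).mp hx)
            have h2 : seenB.contains (v.2.1, v.2.2) = false := by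
              rw [← Bool.not_eq_true, PySem.Set.contains_iff]
              exact hm
            simp only [htgt, h1, h2, Bool.false_eq_true, if_false]
            -- align B's pushed value with A's
            have hbody : (fun fr (c : Int × Int × Int) => if c.1 = v.2.1 then
                  insort (v.1 + (if c.2.2 ≠ v.2.2 then 1 else 0), c.2.1, c.2.2) fr else fr) =
                (fun fr c => if c.1 = v.2.1 then
                  insort ((if c.2.2 ≠ v.2.2 then v.1 + 1 else v.1), c.2.1, c.2.2) fr else fr) := by
              funext fr c
              by_cases hne : c.2.2 ≠ v.2.2 <;> simp [hne]
            rw [hbody]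
            -- A's push loop is an append of the mapped adjacency row
            have hA : ((adjOf connections).getD v.2.1 []).foldl
                (fun hp e => heapPush hp ((if e.2 ≠ v.2.2 then v.1 + 1 else v.1), e.1, e.2))
                ((h :: t).erase v) =
                ((h :: t).erase v) ++
                  ((connections.filter (fun c => c.1 == v.2.1)).map
                    (fun c => ((if c.2.2 ≠ v.2.2 then v.1 + 1 else v.1), c.2.1, c.2.2))) := by
              rw [adjOf_getD]
              simp only [heapPush]
              rw [PySem.List.foldl_append_singleton_eq_map
                (f := fun e : Int × Int => ((if e.2 ≠ v.2.2 then v.1 + 1 else v.1), e.1, e.2))]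
              rw [List.map_map]
              rfl
            rw [hA]
            obtain ⟨hpp, hps⟩ := push_step v.2.1
              (fun c => ((if c.2.2 ≠ v.2.2 then v.1 + 1 else v.1), c.2.1, c.2.2))
              connections ((h :: t).erase v) rest herase hrest
            exact ih _ _ _ _ hpp hps
              (seen_invariant_step seenA seenB v.2.1 v.2.2 hseen)

-- ===== VERDICT (by name: the statement is the Claim_ definition above) =====
theorem solve_spec : Claim_equal_solve := by
  intro connections _ _
  unfold Spec_solve solve solve_alt
  exact bisim (maxNode connections) connections (fuelOf connections)
    [(0, 0, -1)] [(0, 0, -1)] PySem.Dict.empty PySem.Set.empty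
    (List.Perm.refl _) (by simp)
    (by intro p b; simp [PySem.Dict.getD_empty, PySem.Set.empty])
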